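-- pv_equiv track=rewrite | github.com/pranavvikraman25/KONE-Maintenance-Portal | pages/3_Report_Generator.py | map_ckpi_to_key
-- ===== SOURCE A (Python) =====
-- KPI_MAP = {
--     "Door Friction": "doorFriction",
--     "Door Speed Error": "cumulativeDoorSpeedError",
--     "Landing Door Lock Hook Closing Time": "lockHookClosingTime",
--     "Landing Door Lock Hook Open Time": "lockHookTime",
--     "Maximum Force During Coupler Compress": "maximumForceDuringCompress",
--     "Landing Door Lock Roller Clearance": "landingDoorLockRollerClearance"
-- }
--
-- def map_ckpi_to_key(text):
--     t = str(text).strip().lower()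
--     # exact match with display names
--     for display, key in KPI_MAP.items():
--         if display.lower() == t:
--             return key
--     # contains match
--     for display, key in KPI_MAP.items():
--         if display.lower() in t or t in display.lower():
--             return key
--     # contains the key itself
--     for key in KPI_MAP.values():
--         if key.lower() in t:
--             return key
--     return None
-- ===== SOURCE B (Python) =====
-- KPI_MAP = {
--     "Door Friction": "doorFriction",
--     "Door Speed Error": "cumulativeDoorSpeedError",
--     "Landing Door Lock Hook Closing Time": "lockHookClosingTime",
--     "Landing Door Lock Hook Open Time": "lockHookTime",
--     "Maximum Force During Coupler Compress": "maximumForceDuringCompress",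
--     "Landing Door Lock Roller Clearance": "landingDoorLockRollerClearance"
-- }
--
-- def map_ckpi_to_key(text):
--     # single pass: score each entry once (0 exact, 1 substring-overlap, 2 key
--     # contained) and keep the best-scoring entry, earliest entry winning ties
--     t = str(text).strip().lower()
--     best = None  # (tier, key)
--     for display, key in KPI_MAP.items():
--         dl = display.lower()
--         if dl == t:
--             tier = 0
--         elif dl in t or t in dl:
--             tier = 1
--         elif key.lower() in t:
--             tier = 2
--         else:
--             continue
--         if best is None or tier < best[0]:
--             best = (tier, key)
--     return best[1] if best is not None else None
-- ===== Notes on version B (the rewrite author's own statement) =====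
-- stated objective: alternative
-- what changed: A's three staged early-return scans over the map are replaced by a single argmin pass that scores each entry once (0 exact, 1 substring overlap, 2 key contained in text) and keeps the lowest-scoring entry, earliest entry winning ties.
import Mathlib
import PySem

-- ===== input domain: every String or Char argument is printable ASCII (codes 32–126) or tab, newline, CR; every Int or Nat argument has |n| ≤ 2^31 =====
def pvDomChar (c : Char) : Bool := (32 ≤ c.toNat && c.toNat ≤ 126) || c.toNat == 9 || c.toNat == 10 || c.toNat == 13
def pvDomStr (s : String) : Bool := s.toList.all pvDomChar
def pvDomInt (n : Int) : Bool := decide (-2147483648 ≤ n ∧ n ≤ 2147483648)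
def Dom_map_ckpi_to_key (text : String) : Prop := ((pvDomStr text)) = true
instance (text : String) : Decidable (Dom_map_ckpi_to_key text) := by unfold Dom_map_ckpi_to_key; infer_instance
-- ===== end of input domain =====

-- B replaces A's three staged early-return scans by a single pass that scores each
-- entry once (0 exact / 1 substring-overlap / 2 key-contained) and keeps the
-- best-scoring entry; objective: alternative decomposition, same cost.

def kpiMap : List (String × String) := [
  ("Door Friction", "doorFriction"),
  ("Door Speed Error", "cumulativeDoorSpeedError"),
  ("Landing Door Lock Hook Closing Time", "lockHookClosingTime"),
  ("Landing Door Lock Hook Open Time", "lockHookTime"),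
  ("Maximum Force During Coupler Compress", "maximumForceDuringCompress"),
  ("Landing Door Lock Roller Clearance", "landingDoorLockRollerClearance")]

-- ===== PORT A =====
-- first loop: exact match with display names
def scanExactA (t : List Char) : List (String × String) → Option String
  | [] => none
  | (d, k) :: rest =>
      if PySem.Chars.lower d.toList == t then some k else scanExactA t rest

-- second loop: contains match
def scanContainsA (t : List Char) : List (String × String) → Option String
  | [] => none
  | (d, k) :: rest =>
      if PySem.Chars.isIn (PySem.Chars.lower d.toList) t
          || PySem.Chars.isIn t (PySem.Chars.lower d.toList) then some k
      else scanContainsA t rest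

-- third loop: contains the key itself
def scanKeyA (t : List Char) : List (String × String) → Option String
  | [] => none
  | (_, k) :: rest =>
      if PySem.Chars.isIn (PySem.Chars.lower k.toList) t then some k else scanKeyA t rest

def map_ckpi_to_key (text : String) : Option String :=
  let t := (PySem.Str.lower (PySem.Str.strip text)).toList
  match scanExactA t kpiMap with
  | some k => some k
  | none =>
    match scanContainsA t kpiMap with
    | some k => some k
    | none => scanKeyA t kpiMap

-- ===== PORT B =====
-- per-entry score: 0 exact, 1 substring overlap, 2 key contained, none otherwise
def tierOf (t : List Char) (p : String × String) : Option Nat :=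
  let dl := PySem.Chars.lower p.1.toList
  if dl == t then some 0
  else if PySem.Chars.isIn dl t || PySem.Chars.isIn t dl then some 1
  else if PySem.Chars.isIn (PySem.Chars.lower p.2.toList) t then some 2
  else none

-- keep the best (lowest-tier) entry seen so far; earliest entry wins ties
def bestStep (t : List Char) (b : Option (Nat × String)) (p : String × String) :
    Option (Nat × String) :=
  match tierOf t p with
  | none => b
  | some tr =>
    match b with
    | none => some (tr, p.2)
    | some (tb, _) => if tr < tb then some (tr, p.2) else b

def map_ckpi_to_key_alt (text : String) : Option String :=
  let t := (PySem.Str.lower (PySem.Str.strip text)).toList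
  match kpiMap.foldl (bestStep t) none with
  | some (_, k) => some k
  | none => none

-- ===== PRECONDITION & SPEC =====
def Spec_map_ckpi_to_key (text : String) (out : Option String) : Prop := out = map_ckpi_to_key_alt text
instance (text : String) (out : Option String) : Decidable (Spec_map_ckpi_to_key text out) := by unfold Spec_map_ckpi_to_key; infer_instance

-- ===== CLAIM (what is proved, stated in full; the proofs are below) =====
def Claim_equal_map_ckpi_to_key : Prop := ∀ (text : String), Dom_map_ckpi_to_key text → Spec_map_ckpi_to_key text (map_ckpi_to_key text)

-- ===== LEMMAS AND PROOFS =====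

-- left-biased minimum-by-tier of two partial results
def mergeB (b r : Option (Nat × String)) : Option (Nat × String) :=
  match b, r with
  | none, r => r
  | some x, none => some x
  | some (tb, k), some (tr, k') => if tr < tb then some (tr, k') else some (tb, k)

lemma step_eq_merge (t : List Char) (b : Option (Nat × String)) (p : String × String) :
    bestStep t b p = mergeB b (bestStep t none p) := by
  unfold bestStep mergeB
  cases tierOf t p <;> cases b <;> simp

lemma merge_none_right (b : Option (Nat × String)) : mergeB b none = b := by
  cases b <;> rfl

lemma merge_assoc (a b c : Option (Nat × String)) :
    mergeB (mergeB a b) c = mergeB a (mergeB b c) := by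
  obtain _ | ⟨ta, ka⟩ := a
  · rfl
  obtain _ | ⟨tb, kb⟩ := b
  · rfl
  obtain _ | ⟨tc, kc⟩ := c
  · rw [merge_none_right, merge_none_right]
  by_cases h1 : tb < ta <;> by_cases h2 : tc < tb <;> by_cases h3 : tc < ta <;>
    simp [mergeB, h1, h2, h3] <;> omega

lemma foldl_merge (t : List Char) (l : List (String × String)) :
    ∀ b, l.foldl (bestStep t) b = mergeB b (l.foldl (bestStep t) none) := by
  induction l with
  | nil => intro b; exact (merge_none_right b).symm
  | cons p rest ih =>
      intro b
      simp only [List.foldl_cons]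
      rw [ih (bestStep t b p), ih (bestStep t none p),
        step_eq_merge t b p, step_eq_merge t none p]
      rw [merge_assoc]

-- the single best-scoring pass computes exactly A's three-tier result
lemma bfold_char (t : List Char) (l : List (String × String)) :
    l.foldl (bestStep t) none =
      (match scanExactA t l with
       | some k => some (0, k)
       | none =>
         match scanContainsA t l with
         | some k => some (1, k)
         | none =>
           match scanKeyA t l with
           | some k => some (2, k)
           | none => none) := by
  induction l with
  | nil => rfl
  | cons p rest ih =>
      obtain ⟨d, k⟩ := p
      simp only [List.foldl_cons]
      rw [foldl_merge, ih]
      by_cases h0 : (PySem.Chars.lower d.toList == t) = true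
      · have hc : (PySem.Chars.isIn (PySem.Chars.lower d.toList) t
            || PySem.Chars.isIn t (PySem.Chars.lower d.toList)) = true := by
          have := of_decide_eq_true (by simpa using h0)
          subst this
          simp [(PySem.Chars.isIn_iff_infix _ _).mpr (List.infix_refl _)]
        simp only [bestStep, tierOf, scanExactA, h0, hc, if_pos]
        rcases hE : scanExactA t rest with _ | k0 <;>
          rcases hC : scanContainsA t rest with _ | k1 <;>
          rcases hK : scanKeyA t rest with _ | k2 <;>
          simp [mergeB]
      · by_cases h1 : (PySem.Chars.isIn (PySem.Chars.lower d.toList) t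
            || PySem.Chars.isIn t (PySem.Chars.lower d.toList)) = true
        · simp only [bestStep, tierOf, scanExactA, scanContainsA, h0, h1, if_neg,
            if_pos, Bool.false_eq_true, not_false_iff]
          rcases hE : scanExactA t rest with _ | k0 <;>
            rcases hC : scanContainsA t rest with _ | k1 <;>
            rcases hK : scanKeyA t rest with _ | k2 <;>
            simp [mergeB]
        · by_cases h2 : (PySem.Chars.isIn (PySem.Chars.lower k.toList) t) = true
          · simp only [bestStep, tierOf, scanExactA, scanContainsA, scanKeyA, h0, h1, h2,
              if_pos, if_neg, Bool.false_eq_true, not_false_iff]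
            rcases hE : scanExactA t rest with _ | k0 <;>
              rcases hC : scanContainsA t rest with _ | k1 <;>
              rcases hK : scanKeyA t rest with _ | k2 <;>
              simp [mergeB]
          · simp only [bestStep, tierOf, scanExactA, scanContainsA, scanKeyA, h0, h1, h2,
              if_neg, Bool.false_eq_true, not_false_iff]
            simp [mergeB]

-- ===== VERDICT (by name: the statement is the Claim_ definition above) =====
theorem map_ckpi_to_key_spec : Claim_equal_map_ckpi_to_key := by
  intro text _
  unfold Spec_map_ckpi_to_key map_ckpi_to_key map_ckpi_to_key_alt
  simp only [bfold_char]
  rcases hE : scanExactA ((PySem.Str.lower (PySem.Str.strip text)).toList) kpiMap with _ | k0 <;>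
    rcases hC : scanContainsA ((PySem.Str.lower (PySem.Str.strip text)).toList) kpiMap with _ | k1 <;>
    rcases hK : scanKeyA ((PySem.Str.lower (PySem.Str.strip text)).toList) kpiMap with _ | k2 <;>
    rfl
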